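-- pv_equiv track=rewrite | github.com/Darknight47/CodeForce-Challenges-12 | Log.py | count_solved_problems
-- ===== SOURCE A (Python) =====
-- def count_solved_problems(duration, log):
--     # Create a dictionary to track time spent on each problem
--     problem_time = {}
--
--     for problem in log:
--         # Calculate the time required to solve the current problem
--         time_required = ord(problem) - ord('A') + 1
--
--         # Accumulate the time spent on the current problem
--         if problem in problem_time:
--             problem_time[problem] += 1
--         else:
--             problem_time[problem] = 1
--
--     # Count the number of problems solved
--     solved_problems = 0
--     for problem, time_spent in problem_time.items():
--         time_required = ord(problem) - ord('A') + 1
--         if time_spent >= time_required: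
--             solved_problems += 1
--
--     return solved_problems
-- ===== SOURCE B (Python) =====
-- def count_solved_problems(duration, log):
--     # Recursive partition-and-remove: strip all occurrences of the first entry,
--     # judge that entry by how many were removed, recurse on the remainder.
--     if not log:
--         return 0
--     c = log[0]
--     rest = [x for x in log if x != c]
--     n = len(log) - len(rest)
--     return (1 if n >= ord(c) - ord('A') + 1 else 0) + count_solved_problems(duration, rest)
-- ===== Notes on version B (the rewrite author's own statement) =====
-- stated objective: alternative
-- what changed: Replaces A's two-phase frequency-dict build-then-iterate with a recursive partition-and-remove: strip all occurrences of the first entry, judge that entry by how many elements the filter removed, and recurse on the shrunk remainder; no dictionary or counting table is ever built.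
import Mathlib
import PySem

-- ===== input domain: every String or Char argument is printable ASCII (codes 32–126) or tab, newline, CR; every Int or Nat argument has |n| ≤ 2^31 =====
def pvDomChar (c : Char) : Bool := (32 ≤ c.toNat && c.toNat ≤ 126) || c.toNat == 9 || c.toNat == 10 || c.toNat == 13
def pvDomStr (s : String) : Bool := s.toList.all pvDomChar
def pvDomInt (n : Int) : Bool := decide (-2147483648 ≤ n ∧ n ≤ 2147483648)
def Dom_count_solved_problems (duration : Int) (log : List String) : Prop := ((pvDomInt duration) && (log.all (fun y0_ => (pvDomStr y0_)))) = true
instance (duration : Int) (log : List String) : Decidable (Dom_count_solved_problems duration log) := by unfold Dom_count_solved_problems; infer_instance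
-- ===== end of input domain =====

-- B replaces A's dict-building/dict-iteration with a recursive partition-and-remove: strip all occurrences of the first entry, judge it by how many were removed, recurse on the remainder (alternative decomposition; not claimed faster).


-- ===== PORT A =====
-- ord(s) for a one-character string (codes as Int); 0 off the Pre_ domain where Python's ord raises TypeError
def pyOrd (s : String) : Int :=
  match s.toList with
  | [c] => (c.toNat : Int)
  | _ => 0

-- transliteration of A: build the frequency dict, then count entries meeting the threshold
def count_solved_problems (duration : Int) (log : List String) : Int :=
  let problem_time : PySem.Dict String Int :=
    log.foldl (fun d problem =>
      if d.contains problem then d.insert problem ((d.getD problem 0) + 1)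
      else d.insert problem 1) PySem.Dict.empty
  problem_time.items.foldl (fun solved_problems pt =>
    if pt.2 ≥ pyOrd pt.1 - pyOrd "A" + 1 then solved_problems + 1 else solved_problems) 0

-- ===== PORT B =====
-- transliteration of B: if log==[] return 0; c=log[0]; rest=[x for x in log if x!=c];
-- n=len(log)-len(rest); return (1 if n>=ord(c)-ord('A')+1 else 0) + recurse(rest)
def count_solved_problems_alt (duration : Int) (log : List String) : Int :=
  match log with
  | [] => 0
  | c :: t =>
    let rest := (c :: t).filter (fun x => x ≠ c)
    let n : Int := ((c :: t).length : Int) - (rest.length : Int)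
    (if n ≥ pyOrd c - pyOrd "A" + 1 then 1 else 0) + count_solved_problems_alt duration rest
termination_by log.length
decreasing_by
  simp only [List.filter_cons, decide_eq_true_eq, ne_eq, not_true_eq_false, if_false,
    List.length_cons, decide_not]
  exact Nat.lt_succ_of_le (List.length_filter_le _ _)

-- ===== PRECONDITION & SPEC =====
-- Pre_ excludes inputs where some log entry is not a single character: there Python's ord raises TypeError.
def Pre_count_solved_problems (duration : Int) (log : List String) : Prop :=
  ∀ s ∈ log, s.toList.length = 1
instance (duration : Int) (log : List String) : Decidable (Pre_count_solved_problems duration log) := by unfold Pre_count_solved_problems; infer_instance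
def pvWitness_count_solved_problems : Int × List String := (5, ["A", "B", "A", "B"])
def Spec_count_solved_problems (duration : Int) (log : List String) (out : Int) : Prop := out = count_solved_problems_alt duration log
instance (duration : Int) (log : List String) (out : Int) : Decidable (Spec_count_solved_problems duration log out) := by unfold Spec_count_solved_problems; infer_instance

-- ===== CLAIM (what is proved, stated in full; the proofs are below) =====
def Claim_equal_count_solved_problems : Prop := ∀ (duration : Int) (log : List String), Dom_count_solved_problems duration log → Pre_count_solved_problems duration log → Spec_count_solved_problems duration log (count_solved_problems duration log)



-- ===== LEMMAS AND PROOFS =====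
-- the per-entry verdict, and the common normal form: a 0/1 sum over the distinct entries
def pvInd (l : List String) (c : String) : Int :=
  if (PySem.List.count l c : Int) ≥ pyOrd c - pyOrd "A" + 1 then 1 else 0

def pvSum (l : List String) : Int := ((PySem.List.dedup l).map (pvInd l)).sum

-- A's dict-building step is Counter's step
theorem pv_stepA_eq_counter_step (d : PySem.Dict String Int) (p : String) :
    (if d.contains p then d.insert p ((d.getD p 0) + 1) else d.insert p 1)
      = d.modify p 0 (· + 1) := by
  by_cases h : d.contains p = true
  · simp [h, PySem.Dict.modify, PySem.Dict.getD]
  · rw [PySem.Dict.contains_eq_isSome_get?] at h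
    cases hg : d.get? p with
    | none => simp [hg, PySem.Dict.modify, PySem.Dict.getD]
    | some v => simp [hg] at h

-- a counting foldl is the sum of the 0/1 indicators
theorem pv_foldl_if (P : String → Prop) [DecidablePred P] (l : List String) :
    l.foldl (fun s x => if P x then s + 1 else s) 0
      = (l.map (fun x => if P x then (1 : Int) else 0)).sum := by
  have h : (fun (s : Int) x => if P x then s + 1 else s)
      = (fun s x => s + (if P x then (1 : Int) else 0)) := by
    funext s x; split_ifs <;> ring
  rw [h, PySem.List.foldl_add]; ring

theorem pv_A_eq_sum (duration : Int) (log : List String) :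
    count_solved_problems duration log = pvSum log := by
  unfold count_solved_problems
  have hstep : (fun (d : PySem.Dict String Int) problem =>
      if d.contains problem then d.insert problem ((d.getD problem 0) + 1)
      else d.insert problem 1) = (fun d x => d.modify x 0 (· + 1)) := by
    funext d p; exact pv_stepA_eq_counter_step d p
  rw [hstep, ← PySem.Dict.counter_eq_foldl]
  show (PySem.Dict.counter log).items.foldl
      (fun solved_problems pt =>
        if pt.2 ≥ pyOrd pt.1 - pyOrd "A" + 1 then solved_problems + 1 else solved_problems) 0 = pvSum log
  rw [PySem.Dict.items_counter, List.foldl_map]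
  rw [pv_foldl_if (fun k => ((List.count k log : Int) ≥ pyOrd k - pyOrd "A" + 1))]
  unfold pvSum pvInd
  rw [PySem.List.dedup_eq_ofList]
  congr 1

-- moving an element already at the accumulator's head commutes with Set-building
theorem pv_foldl_add_cons (l : List String) (c : String) :
    ∀ acc : List String, (∀ x ∈ l, x ≠ c) →
      l.foldl PySem.Set.add (c :: acc) = c :: l.foldl PySem.Set.add acc := by
  induction l with
  | nil => intro acc _; rfl
  | cons y t ih =>
    intro acc hl
    have hy : y ≠ c := hl y (by simp)
    have hadd : PySem.Set.add (c :: acc) y = c :: PySem.Set.add acc y := by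
      simp only [PySem.Set.add, PySem.Set.contains, List.contains_cons]
      have : (y == c) = false := by rw [Bool.beq_eq_decide_eq]; simp [hy]
      rw [this]
      simp only [Bool.false_or]
      split_ifs <;> simp
    simp only [List.foldl_cons, hadd]
    exact ih _ (fun x hx => hl x (by simp [hx]))

-- elements equal to one already present contribute nothing to Set-building
theorem pv_foldl_add_filter (l : List String) (c : String) :
    ∀ acc : List String, c ∈ acc →
      l.foldl PySem.Set.add acc = (l.filter (fun x => x ≠ c)).foldl PySem.Set.add acc := by
  induction l with
  | nil => intro acc _; rfl
  | cons y t ih =>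
    intro acc hc
    by_cases hy : y = c
    · subst hy
      have hacc : PySem.Set.add acc y = acc := by
        simp [PySem.Set.add, PySem.Set.contains, hc]
      have hfil : List.filter (fun x => decide (x ≠ y)) (y :: t)
          = List.filter (fun x => decide (x ≠ y)) t := by simp
      rw [hfil, List.foldl_cons, hacc]
      exact ih acc hc
    · have hfil : List.filter (fun x => decide (x ≠ c)) (y :: t)
          = y :: List.filter (fun x => decide (x ≠ c)) t := by simp [hy]
      rw [hfil, List.foldl_cons, List.foldl_cons]
      apply ih
      simp only [PySem.Set.add]
      split_ifs <;> simp [hc]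

-- the distinct entries of c :: t are c followed by the distinct entries with c removed
theorem pv_dedup_cons (c : String) (t : List String) :
    PySem.List.dedup (c :: t) = c :: PySem.List.dedup (t.filter (fun x => x ≠ c)) := by
  rw [PySem.List.dedup_eq_ofList, PySem.List.dedup_eq_ofList,
    PySem.Set.ofList_eq_foldl, PySem.Set.ofList_eq_foldl]
  simp only [List.foldl_cons]
  have h1 : PySem.Set.add ([] : List String) c = [c] := rfl
  rw [h1, show ([c] : List String) = (c :: ([] : List String)) from rfl]
  rw [pv_foldl_add_filter t c (c :: ([] : List String)) (by simp)]
  exact pv_foldl_add_cons _ c _ (fun x hx => by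
    have := List.of_mem_filter hx; simpa using this)

-- dropping every copy of c removes exactly count-of-c elements
theorem pv_length_filter (c : String) (l : List String) :
    (List.filter (fun x => decide (x ≠ c)) l).length = l.length - List.count c l := by
  have hp : (fun (x : String) => decide (x ≠ c)) = (fun x => !(x == c)) := by
    funext x; simp only [decide_not]; rw [← Bool.beq_eq_decide_eq]
  rw [hp]
  induction l with
  | nil => rfl
  | cons y t ih =>
    have hcle : List.count c t ≤ t.length := List.count_le_length
    rw [List.filter_cons, List.count_cons, List.length_cons]
    by_cases h : y = c
    · subst h
      simp only [BEq.rfl, Bool.not_true, Bool.false_eq_true, if_false, if_true, ih]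
      omega
    · have hb : (y == c) = false := by rw [Bool.beq_eq_decide_eq]; simp [h]
      simp only [hb, Bool.not_false, Bool.false_eq_true, if_true, if_false, List.length_cons, ih]
      omega

-- counts of survivors are unchanged by the filter
theorem pv_count_filter (c x : String) (t : List String) (hx : x ≠ c) :
    List.count x (List.filter (fun y => decide (y ≠ c)) t) = List.count x t :=
  List.count_filter (by simp [hx])

theorem pv_B_eq_sum (duration : Int) (log : List String) :
    count_solved_problems_alt duration log = pvSum log := by
  induction log using count_solved_problems_alt.induct with
  | case1 => rw [count_solved_problems_alt]; rfl
  | case2 c t rest ih =>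
    rw [count_solved_problems_alt]
    rw [ih]
    have hfil : List.filter (fun x => decide (x ≠ c)) (c :: t)
        = List.filter (fun x => decide (x ≠ c)) t := by simp
    have hn : ((c :: t).length : Int)
        - ((List.filter (fun x => decide (x ≠ c)) (c :: t)).length : Int)
        = (PySem.List.count (c :: t) c : Int) := by
      rw [hfil, pv_length_filter, PySem.List.count_eq, List.count_cons_self, List.length_cons]
      have hcle : List.count c t ≤ t.length := List.count_le_length
      omega
    rw [hn]
    have hsum : pvSum (c :: t)
        = pvInd (c :: t) c + pvSum (List.filter (fun x => decide (x ≠ c)) t) := by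
      unfold pvSum
      rw [pv_dedup_cons, List.map_cons, List.sum_cons]
      congr 1
      congr 1
      apply List.map_congr_left
      intro x hx
      have hxm : x ∈ List.filter (fun y => decide (y ≠ c)) t := by
        rw [PySem.List.mem_dedup] at hx; exact hx
      have hxc : x ≠ c := by have := List.of_mem_filter hxm; simpa using this
      unfold pvInd
      rw [PySem.List.count_eq, PySem.List.count_eq, List.count_cons_of_ne (Ne.symm hxc),
        pv_count_filter c x t hxc]
    have hrest : rest = List.filter (fun x => decide (x ≠ c)) t := hfil
    rw [hsum, hrest]
    unfold pvInd
    rfl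

-- ===== VERDICT (by name: the statement is the Claim_ definition above) =====
theorem count_solved_problems_spec : Claim_equal_count_solved_problems := by
  intro duration log _ _
  unfold Spec_count_solved_problems
  rw [pv_A_eq_sum, pv_B_eq_sum]
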